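-- pv_equiv track=rewrite | github.com/ldct/cp | atcoder/abc192/D/D.py | ans_slow
-- ===== SOURCE A (Python) =====
-- from functools import lru_cache
--
-- def ans_slow(X, M):
--     if X == 1: return 1
--
--     S = list(map(int, str(X)))[::-1]
--
--     @lru_cache(None)
--     def ok(b):
--         ret = 0
--         for i in range(len(S)):
--             ret += S[i]*(b**i)
--             if ret > M: return False
--         return ret
--
--     ret = set()
--     for t in range(int(max(S))+1, 10000):
--         if ok(t):
--             ret.add(ok(t))
--     return len(ret)
-- ===== SOURCE B (Python) =====
-- def ans_slow(X, M):
--     if X == 1: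
--         return 1
--     if X < 10:
--         return 1 if 1 <= X <= M else 0
--     digits = list(map(int, str(X)))
--     lo0 = max(digits) + 1
--
--     def val(b):
--         v = 0
--         for d in digits:
--             v = v * b + d
--         return v
--
--     if val(lo0) > M:
--         return 0
--     lo, hi = lo0, 9999
--     while lo < hi:
--         mid = (lo + hi + 1) // 2
--         if val(mid) <= M:
--             lo = mid
--         else:
--             hi = mid - 1
--     return lo - lo0 + 1
-- ===== Notes on version B (the rewrite author's own statement) =====
-- stated objective: faster
-- what changed: A evaluates the digit polynomial for every base t in [max_digit+1, 10000) and collects the qualifying values in a set; B exploits that the value is strictly increasing in the base (X >= 10), so the valid bases form one contiguous range found by binary search on the base, with the single-digit cases handled directly.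
import Mathlib
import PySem

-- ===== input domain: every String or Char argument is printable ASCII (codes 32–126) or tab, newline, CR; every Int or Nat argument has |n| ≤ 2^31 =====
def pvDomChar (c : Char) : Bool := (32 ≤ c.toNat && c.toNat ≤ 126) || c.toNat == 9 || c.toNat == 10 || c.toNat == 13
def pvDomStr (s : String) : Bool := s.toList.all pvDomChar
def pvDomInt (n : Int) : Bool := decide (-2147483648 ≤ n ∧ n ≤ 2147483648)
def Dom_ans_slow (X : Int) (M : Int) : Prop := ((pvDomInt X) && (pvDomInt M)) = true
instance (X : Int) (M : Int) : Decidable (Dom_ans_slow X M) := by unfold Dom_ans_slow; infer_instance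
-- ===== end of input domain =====

-- B replaces A's scan of all 10000 candidate bases by a binary search over the base (the digit value is
-- monotone in the base), counting the valid bases as one contiguous range; equivalence is proved for X ≥ 0
-- (for X < 0 the Python A raises ValueError on int('-')).

-- ===== PORT A =====

-- int(c) for one character c of str(X); exact whenever c is a decimal digit, which holds for every
-- character of str(X) when X ≥ 0 (Pre_); for X < 0 Python raises ValueError on '-' (excluded by Pre_).
def pvDigitVal (c : Char) : Int := (PySem.Int.ofChars? [c]).getD 0

-- list(map(int, str(X)))
def pvDecDigits (X : Int) : List Int := (PySem.Int.toStr X).toList.map pvDigitVal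

-- the body of ok: 'for i in range(len(S)): ret += S[i]*(b**i); if ret > M: return False' with early exit;
-- none models the returned False, some ret the final 'return ret'.
def ansA_okGo (S : List Int) (M : Int) (b : Int) : List Int → Int → Option Int
  | [], ret => some ret
  | i :: rest, ret =>
    let ret' := ret + (PySem.List.pyGetD S i 0) * b ^ i.toNat   -- b**i with i ≥ 0 (from range)
    if ret' > M then none else ansA_okGo S M b rest ret'

def ansA_ok (S : List Int) (M : Int) (b : Int) : Option Int :=
  ansA_okGo S M b (PySem.List.pyRange 0 (PySem.List.len S) 1) 0

def ans_slow (X : Int) (M : Int) : Int :=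
  if X = 1 then 1
  else
    -- S = list(map(int, str(X)))[::-1]  ([::-1] is reverse, PySem.List.slice?_none_none_neg_one)
    let S := (pvDecDigits X).reverse
    -- int(max(S)): S ≠ [] for X ≥ 0, so the .getD 0 default is unreachable under Pre_
    let mx := (PySem.List.max? S (fun d => d)).getD 0
    let ret : PySem.Set Int :=
      (PySem.List.pyRange (mx + 1) 10000 1).foldl
        (fun r t =>
          match ansA_ok S M t with          -- 'if ok(t): ret.add(ok(t))' — False and 0 are falsy
          | none => r
          | some v => if v ≠ 0 then PySem.Set.add r v else r)
        PySem.Set.empty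
    PySem.List.len ret

-- ===== PORT B =====

-- val(b): Horner evaluation of the (big-endian) digits of X in base b
def ansB_val (ds : List Int) (b : Int) : Int := ds.foldl (fun v d => v * b + d) 0

-- the 'while lo < hi' binary-search loop of B
def ansB_search (ds : List Int) (M : Int) (lo hi : Int) : Int :=
  if h : lo < hi then
    let mid := PySem.Int.floordiv (lo + hi + 1) 2
    if ansB_val ds mid ≤ M then ansB_search ds M mid hi
    else ansB_search ds M lo (mid - 1)
  else lo
termination_by (hi - lo).toNat
decreasing_by
  · have hm : PySem.Int.floordiv (lo + hi + 1) 2 = (lo + hi + 1) / 2 :=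
      PySem.Int.floordiv_eq_ediv_of_pos (by omega)
    rw [hm]; omega
  · have hm : PySem.Int.floordiv (lo + hi + 1) 2 = (lo + hi + 1) / 2 :=
      PySem.Int.floordiv_eq_ediv_of_pos (by omega)
    rw [hm]; omega

def ans_slow_alt (X : Int) (M : Int) : Int :=
  if X = 1 then 1
  else if X < 10 then (if 1 ≤ X ∧ X ≤ M then 1 else 0)
  else
    let ds := pvDecDigits X
    let lo0 := (PySem.List.max? ds (fun d => d)).getD 0 + 1
    if M < ansB_val ds lo0 then 0
    else ansB_search ds M lo0 9999 - lo0 + 1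

-- ===== PRECONDITION & SPEC =====
-- Pre_ excludes X < 0, on which Python A raises ValueError (int('-') while converting the digits of str(X)).
def Pre_ans_slow (X : Int) (M : Int) : Prop := 0 ≤ X
instance (X : Int) (M : Int) : Decidable (Pre_ans_slow X M) := by unfold Pre_ans_slow; infer_instance
def pvWitness_ans_slow : Int × Int := (42, 100)

def Spec_ans_slow (X : Int) (M : Int) (out : Int) : Prop := out = ans_slow_alt X M
instance (X : Int) (M : Int) (out : Int) : Decidable (Spec_ans_slow X M out) := by unfold Spec_ans_slow; infer_instance

-- ===== CLAIM (what is proved, stated in full; the proofs are below) =====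
def Claim_equal_ans_slow : Prop := ∀ (X : Int) (M : Int), Dom_ans_slow X M → Pre_ans_slow X M → Spec_ans_slow X M (ans_slow X M)

-- ===== LEMMAS AND PROOFS =====

lemma pvTdcAcc : ∀ (f n : Nat) (acc : List Char),
    Nat.toDigitsCore 10 f n acc = Nat.toDigitsCore 10 f n [] ++ acc := by
  intro f
  induction f with
  | zero => intro n acc; simp [Nat.toDigitsCore]
  | succ f ih =>
    intro n acc
    simp only [Nat.toDigitsCore]
    by_cases h : n / 10 = 0
    · simp [h]
    · simp only [h, if_false]
      rw [ih (n / 10) (Nat.digitChar (n % 10) :: acc), ih (n / 10) [Nat.digitChar (n % 10)]]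
      simp

lemma pvTdcFuel : ∀ (n : Nat), ∀ (f f' : Nat), n < f → n < f' →
    Nat.toDigitsCore 10 f n [] = Nat.toDigitsCore 10 f' n [] := by
  intro n
  induction n using Nat.strong_induction_on with
  | _ n ih =>
    intro f f' hf hf'
    obtain ⟨g, rfl⟩ : ∃ g, f = g + 1 := ⟨f - 1, by omega⟩
    obtain ⟨g', rfl⟩ : ∃ g', f' = g' + 1 := ⟨f' - 1, by omega⟩
    simp only [Nat.toDigitsCore]
    by_cases h : n / 10 = 0
    · simp [h]
    · simp only [h, if_false]
      rw [pvTdcAcc g (n / 10), pvTdcAcc g' (n / 10)]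
      rw [ih (n / 10) (by omega) g g' (by omega) (by omega)]

lemma pvToDigits_lt (n : Nat) (h : n < 10) : Nat.toDigits 10 n = [Nat.digitChar n] := by
  simp [Nat.toDigits, Nat.toDigitsCore, Nat.div_eq_of_lt h, Nat.mod_eq_of_lt h]

lemma pvToDigits_ge (n : Nat) (h : 10 ≤ n) :
    Nat.toDigits 10 n = Nat.toDigits 10 (n / 10) ++ [Nat.digitChar (n % 10)] := by
  show Nat.toDigitsCore 10 (n + 1) n [] = Nat.toDigitsCore 10 (n / 10 + 1) (n / 10) [] ++ _
  conv_lhs => rw [Nat.toDigitsCore]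
  have h0 : n / 10 ≠ 0 := by omega
  simp only [h0, if_false]
  rw [pvTdcAcc n (n / 10) [Nat.digitChar (n % 10)]]
  rw [pvTdcFuel (n / 10) n (n / 10 + 1) (by omega) (by omega)]

def pvDigitsN (n : Nat) : List Int := (Nat.toDigits 10 n).map pvDigitVal

lemma pvDigitVal_digitChar (d : Nat) (h : d < 10) : pvDigitVal (Nat.digitChar d) = (d : Int) := by
  interval_cases d <;> decide

lemma pvDigitsN_lt (n : Nat) (h : n < 10) : pvDigitsN n = [(n : Int)] := by
  simp [pvDigitsN, pvToDigits_lt n h, pvDigitVal_digitChar n h]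

lemma pvDigitsN_ge (n : Nat) (h : 10 ≤ n) :
    pvDigitsN n = pvDigitsN (n / 10) ++ [((n % 10 : Nat) : Int)] := by
  simp [pvDigitsN, pvToDigits_ge n h, pvDigitVal_digitChar (n % 10) (by omega)]

lemma pvDecDigits_eq (X : Int) (h : 0 ≤ X) : pvDecDigits X = pvDigitsN X.toNat := by
  simp [pvDecDigits, PySem.Int.toList_toStr, PySem.Int.toChars, not_lt.mpr h, pvDigitsN]

lemma pvDigitsN_ne_nil (n : Nat) : pvDigitsN n ≠ [] := by
  by_cases h : n < 10
  · simp [pvDigitsN_lt n h]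
  · simp [pvDigitsN_ge n (by omega)]

lemma pvDigitsN_bounds (n : Nat) : ∀ d ∈ pvDigitsN n, 0 ≤ d ∧ d ≤ 9 := by
  induction n using Nat.strong_induction_on with
  | _ n ih =>
    by_cases h : n < 10
    · rw [pvDigitsN_lt n h]; intro d hd; simp at hd; subst hd; omega
    · rw [pvDigitsN_ge n (by omega)]
      intro d hd
      rcases List.mem_append.1 hd with h1 | h1
      · exact ih (n / 10) (by omega) d h1
      · rw [List.mem_singleton] at h1; subst h1; constructor <;> omega

lemma pvDigitsN_head_pos (n : Nat) (h : 1 ≤ n) :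
    ∃ d tl, pvDigitsN n = d :: tl ∧ 1 ≤ d := by
  induction n using Nat.strong_induction_on with
  | _ n ih =>
    by_cases h10 : n < 10
    · exact ⟨(n : Int), [], pvDigitsN_lt n h10, by exact_mod_cast h⟩
    · obtain ⟨d, tl, heq, hd⟩ := ih (n / 10) (by omega) (by omega)
      exact ⟨d, tl ++ [((n % 10 : Nat) : Int)], by rw [pvDigitsN_ge n (by omega), heq]; rfl, hd⟩

lemma pvDigitsN_len2 (n : Nat) (h : 10 ≤ n) : 2 ≤ (pvDigitsN n).length := by
  rw [pvDigitsN_ge n h]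
  have := pvDigitsN_ne_nil (n / 10)
  have : 1 ≤ (pvDigitsN (n / 10)).length := List.length_pos_iff.mpr this
  simp [List.length_append]; omega

lemma pvHorner_shift (tl : List Int) (b : Int) :
    ∀ i : Int, tl.foldl (fun v d => v * b + d) i
      = i * b ^ tl.length + tl.foldl (fun v d => v * b + d) 0 := by
  induction tl with
  | nil => intro i; simp
  | cons e tl ih =>
    intro i
    simp only [List.foldl_cons, List.length_cons]
    rw [ih (i * b + e), ih (0 * b + e)]
    ring

lemma pvVal_cons (d : Int) (tl : List Int) (b : Int) :
    ansB_val (d :: tl) b = d * b ^ tl.length + ansB_val tl b := by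
  simp only [ansB_val, List.foldl_cons]
  rw [pvHorner_shift tl b (0 * b + d)]
  ring

lemma pvSum_reverse_eq_val (ds : List Int) (b : Int) :
    (((List.range ds.reverse.length).map (fun k => ds.reverse.getD k 0 * b ^ k)).sum) = ansB_val ds b := by
  induction ds with
  | nil => simp [ansB_val]
  | cons d tl ih =>
    have hlen : (d :: tl).reverse.length = tl.reverse.length + 1 := by simp
    rw [hlen, List.range_succ, List.map_append, List.sum_append]
    have h1 : (List.range tl.reverse.length).map (fun k => (d :: tl).reverse.getD k 0 * b ^ k)
        = (List.range tl.reverse.length).map (fun k => tl.reverse.getD k 0 * b ^ k) := by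
      apply List.map_congr_left
      intro k hk
      rw [List.mem_range] at hk
      have : (d :: tl).reverse = tl.reverse ++ [d] := by simp
      rw [this, List.getD_append _ _ _ _ hk]
    have h2 : (d :: tl).reverse.getD tl.reverse.length 0 = d := by
      have he : (d :: tl).reverse = tl.reverse ++ [d] := by simp
      rw [he]
      simp [List.getD_eq_getElem?_getD]
    rw [h1, ih]
    simp only [List.map_cons, List.map_nil, List.sum_cons, List.sum_nil]
    rw [h2, pvVal_cons]
    simp [add_comm]

lemma pvOkGo_spec (S : List Int) (M b : Int) :
    ∀ (L : List Int) (ret : Int), L ≠ [] →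
      (∀ i ∈ L, 0 ≤ PySem.List.pyGetD S i 0 * b ^ i.toNat) →
      ansA_okGo S M b L ret =
        (if ret + (L.map (fun i => PySem.List.pyGetD S i 0 * b ^ i.toNat)).sum ≤ M
         then some (ret + (L.map (fun i => PySem.List.pyGetD S i 0 * b ^ i.toNat)).sum)
         else none) := by
  intro L
  induction L with
  | nil => intro ret hne _; exact absurd rfl hne
  | cons i rest ih =>
    intro ret _ hpos
    simp only [ansA_okGo, List.map_cons, List.sum_cons]
    by_cases hgt : ret + PySem.List.pyGetD S i 0 * b ^ i.toNat > M
    · have hsum : 0 ≤ (rest.map (fun i => PySem.List.pyGetD S i 0 * b ^ i.toNat)).sum := by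
        apply List.sum_nonneg
        intro x hx
        obtain ⟨j, hj, rfl⟩ := List.mem_map.1 hx
        exact hpos j (List.mem_cons_of_mem _ hj)
      rw [if_pos hgt, if_neg (by omega)]
    · rw [if_neg hgt]
      cases rest with
      | nil => simp only [ansA_okGo, List.map_nil, List.sum_nil, add_zero]
               rw [if_pos (by omega)]
      | cons j rest' =>
        rw [ih _ (List.cons_ne_nil _ _) (fun x hx => hpos x (List.mem_cons_of_mem _ hx))]
        have : ret + PySem.List.pyGetD S i 0 * b ^ i.toNat +
            ((j :: rest').map (fun i => PySem.List.pyGetD S i 0 * b ^ i.toNat)).sum =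
            ret + (PySem.List.pyGetD S i 0 * b ^ i.toNat +
              ((j :: rest').map (fun i => PySem.List.pyGetD S i 0 * b ^ i.toNat)).sum) := by ring
        rw [this]

lemma pvOk_eq (ds : List Int) (M b : Int) (hne : ds ≠ []) (hd : ∀ d ∈ ds, 0 ≤ d) (hb : 0 ≤ b) :
    ansA_ok ds.reverse M b = (if ansB_val ds b ≤ M then some (ansB_val ds b) else none) := by
  have hSne : ds.reverse ≠ [] := by simpa using hne
  have hlen : 0 < ds.reverse.length := List.length_pos_iff.mpr hSne
  have hL : PySem.List.pyRange 0 (PySem.List.len ds.reverse) 1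
      = (List.range ds.reverse.length).map (fun k : Nat => (k : Int)) := by
    rw [PySem.List.len, PySem.List.pyRange_one]
    simp only [zero_add, Int.sub_zero, Int.toNat_natCast]
  have hget : ∀ k : Nat, 0 ≤ PySem.List.pyGetD ds.reverse (k : Int) 0 := by
    intro k
    rw [PySem.List.pyGetD_natCast]
    rcases Nat.lt_or_ge k ds.reverse.length with hk | hk
    · rw [List.getD_eq_getElem _ _ hk]
      exact hd _ (List.mem_reverse.1 (List.getElem_mem hk))
    · rw [List.getD_eq_default _ _ hk]
  have hLne : PySem.List.pyRange 0 (PySem.List.len ds.reverse) 1 ≠ [] := by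
    rw [hL]
    apply List.ne_nil_of_length_pos
    simpa using hlen
  rw [ansA_ok, pvOkGo_spec ds.reverse M b _ 0 hLne ?hpos]
  case hpos =>
    intro i hi
    rw [hL] at hi
    obtain ⟨k, _, rfl⟩ := List.mem_map.1 hi
    exact mul_nonneg (hget k) (pow_nonneg hb _)
  have hsum : ((PySem.List.pyRange 0 (PySem.List.len ds.reverse) 1).map
      (fun i => PySem.List.pyGetD ds.reverse i 0 * b ^ i.toNat)).sum = ansB_val ds b := by
    rw [hL, List.map_map, ← pvSum_reverse_eq_val ds b]
    congr 1
    apply List.map_congr_left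
    intro k _
    simp only [Function.comp_apply, PySem.List.pyGetD_natCast, Int.toNat_natCast]
  rw [hsum]
  simp

lemma pvHorner_mono (ds : List Int) (hd : ∀ d ∈ ds, 0 ≤ d) :
    ∀ (i1 i2 b1 b2 : Int), 0 ≤ i1 → i1 ≤ i2 → 1 ≤ b1 → b1 ≤ b2 →
      ds.foldl (fun v d => v * b1 + d) i1 ≤ ds.foldl (fun v d => v * b2 + d) i2 := by
  induction ds with
  | nil => intro i1 i2 b1 b2 _ h12 _ _; simpa using h12
  | cons d tl ih =>
    intro i1 i2 b1 b2 h0 h12 hb1 hb12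
    simp only [List.foldl_cons]
    have hd0 : 0 ≤ d := hd d List.mem_cons_self
    apply ih (fun e he => hd e (List.mem_cons_of_mem _ he))
    · nlinarith
    · nlinarith
    · exact hb1
    · exact hb12

lemma pvHorner_strict (ds : List Int) (hd : ∀ d ∈ ds, 0 ≤ d) :
    ∀ (i1 i2 b1 b2 : Int), 0 ≤ i1 → i1 < i2 → 1 ≤ b1 → b1 ≤ b2 →
      ds.foldl (fun v d => v * b1 + d) i1 < ds.foldl (fun v d => v * b2 + d) i2 := by
  induction ds with
  | nil => intro i1 i2 b1 b2 _ h12 _ _; simpa using h12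
  | cons d tl ih =>
    intro i1 i2 b1 b2 h0 h12 hb1 hb12
    simp only [List.foldl_cons]
    have hd0 : 0 ≤ d := hd d List.mem_cons_self
    apply ih (fun e he => hd e (List.mem_cons_of_mem _ he))
    · nlinarith
    · nlinarith
    · exact hb1
    · exact hb12

lemma pvHorner_pos (ds : List Int) (hd : ∀ d ∈ ds, 0 ≤ d) :
    ∀ (init b : Int), 1 ≤ init → 1 ≤ b → 1 ≤ ds.foldl (fun v d => v * b + d) init := by
  induction ds with
  | nil => intro init b h _; simpa using h
  | cons d tl ih =>
    intro init b h hb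
    simp only [List.foldl_cons]
    have hd0 : 0 ≤ d := hd d List.mem_cons_self
    apply ih (fun e he => hd e (List.mem_cons_of_mem _ he))
    · nlinarith
    · exact hb

lemma pvVal_mono (ds : List Int) (hd : ∀ d ∈ ds, 0 ≤ d) (b1 b2 : Int)
    (h1 : 1 ≤ b1) (h12 : b1 ≤ b2) : ansB_val ds b1 ≤ ansB_val ds b2 :=
  pvHorner_mono ds hd 0 0 b1 b2 le_rfl le_rfl h1 h12

lemma pvVal_strict (d : Int) (tl : List Int) (hd1 : 1 ≤ d) (hd : ∀ e ∈ tl, 0 ≤ e)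
    (htl : tl ≠ []) (b1 b2 : Int) (h1 : 1 ≤ b1) (h12 : b1 < b2) :
    ansB_val (d :: tl) b1 < ansB_val (d :: tl) b2 := by
  cases tl with
  | nil => exact absurd rfl htl
  | cons e tl' =>
    simp only [ansB_val, List.foldl_cons]
    have he0 : 0 ≤ e := hd e List.mem_cons_self
    apply pvHorner_strict tl' (fun x hx => hd x (List.mem_cons_of_mem _ hx))
    · nlinarith
    · nlinarith
    · exact h1
    · omega

lemma pvVal_pos (d : Int) (tl : List Int) (hd1 : 1 ≤ d) (hd : ∀ e ∈ tl, 0 ≤ e)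
    (b : Int) (hb : 1 ≤ b) : 1 ≤ ansB_val (d :: tl) b := by
  simp only [ansB_val, List.foldl_cons]
  apply pvHorner_pos tl hd
  · nlinarith
  · exact hb

lemma pvFoldAdd_nodup (xs : List Int) : ∀ (s : List Int), xs.Nodup → (∀ x ∈ xs, x ∉ s) →
    xs.foldl PySem.Set.add s = s ++ xs := by
  induction xs with
  | nil => intro s _ _; simp
  | cons x xs ih =>
    intro s hnd hfresh
    simp only [List.foldl_cons]
    have hx : PySem.Set.add s x = s ++ [x] := by
      have hxs : x ∉ s := hfresh x List.mem_cons_self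
      simp [PySem.Set.add, PySem.Set.contains, hxs]
    rw [hx, ih (s ++ [x]) (List.Nodup.of_cons hnd) ?fresh]
    · simp
    case fresh =>
      intro y hy
      simp only [List.mem_append, List.mem_singleton]
      intro hmem
      rcases hmem with h | h
      · exact hfresh y (List.mem_cons_of_mem _ hy) h
      · exact (List.nodup_cons.1 hnd).1 (h ▸ hy)

lemma pvFoldAdd_mem (x : Int) (ys : List Int) : ∀ (s : List Int), x ∈ s →
    ys.foldl (fun r (_ : Int) => PySem.Set.add r x) s = s := by
  induction ys with
  | nil => intro s _; rfl
  | cons y ys ih =>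
    intro s hx
    simp only [List.foldl_cons]
    have : PySem.Set.add s x = s := by
      simp [PySem.Set.add, PySem.Set.contains, hx]
    rw [this, ih s hx]

lemma pvFoldAdd_const (x : Int) (xs : List Int) (h : xs ≠ []) :
    xs.foldl (fun r (_ : Int) => PySem.Set.add r x) PySem.Set.empty = [x] := by
  cases xs with
  | nil => exact absurd rfl h
  | cons y ys =>
    simp only [List.foldl_cons]
    have h1 : PySem.Set.add PySem.Set.empty x = [x] := by
      simp [PySem.Set.add, PySem.Set.contains, PySem.Set.empty]
    rw [h1, pvFoldAdd_mem x ys [x] (List.mem_singleton.2 rfl)]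

lemma pvFilterRange_len (a b c : Int) (hac : a ≤ c) (hcb : c ≤ b) (p : Int → Bool)
    (hp : ∀ t : Int, a ≤ t → t < b → (p t = true ↔ t < c)) :
    ((PySem.List.pyRange a b 1).filter p).length = (c - a).toNat := by
  rw [PySem.List.pyRange_one_append a c b hac hcb, List.filter_append, List.length_append]
  have h1 : (PySem.List.pyRange a c 1).filter p = PySem.List.pyRange a c 1 := by
    apply List.filter_eq_self.2
    intro t ht
    rcases PySem.List.mem_pyRange_one.1 ht with ⟨h1, h2⟩
    exact (hp t h1 (by omega)).2 h2
  have h2 : (PySem.List.pyRange c b 1).filter p = [] := by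
    apply List.filter_eq_nil_iff.2
    intro t ht
    rcases PySem.List.mem_pyRange_one.1 ht with ⟨hh1, hh2⟩
    intro hpt
    have := (hp t (by omega) hh2).1 hpt
    omega
  rw [h1, h2, PySem.List.length_pyRange_one]
  simp

lemma pvMax_reverse (ds : List Int) (hne : ds ≠ []) :
    (PySem.List.max? ds.reverse (fun d => d)).getD 0 = (PySem.List.max? ds (fun d => d)).getD 0 := by
  have hSne : ds.reverse ≠ [] := by simpa using hne
  cases e1 : PySem.List.max? ds.reverse (fun d => d) with
  | none => exact absurd ((PySem.List.max?_eq_none_iff _ _).1 e1) hSne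
  | some m1 =>
    cases e2 : PySem.List.max? ds (fun d => d) with
    | none => exact absurd ((PySem.List.max?_eq_none_iff _ _).1 e2) hne
    | some m2 =>
      simp only [Option.getD_some]
      have hm1 : m1 ∈ ds := List.mem_reverse.1 (PySem.List.max?_mem e1)
      have hm2 : m2 ∈ ds.reverse := List.mem_reverse.2 (PySem.List.max?_mem e2)
      exact le_antisymm (PySem.List.max?_isMax e2 m1 hm1) (PySem.List.max?_isMax e1 m2 hm2)

lemma pvSearch_spec (ds : List Int) (M lo0 : Int)
    (hmono : ∀ t1 t2 : Int, lo0 ≤ t1 → t1 ≤ t2 → ansB_val ds t1 ≤ ansB_val ds t2) :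
    ∀ (lo hi : Int), lo0 ≤ lo → lo ≤ hi → ansB_val ds lo ≤ M →
      (∀ t : Int, hi < t → t ≤ 9999 → M < ansB_val ds t) →
      lo ≤ ansB_search ds M lo hi ∧ ansB_search ds M lo hi ≤ hi ∧
        ansB_val ds (ansB_search ds M lo hi) ≤ M ∧
        (∀ t : Int, ansB_search ds M lo hi < t → t ≤ 9999 → M < ansB_val ds t) := by
  have main : ∀ (fuel : Nat) (lo hi : Int), (hi - lo).toNat = fuel →
      lo0 ≤ lo → lo ≤ hi → ansB_val ds lo ≤ M →
      (∀ t : Int, hi < t → t ≤ 9999 → M < ansB_val ds t) →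
      lo ≤ ansB_search ds M lo hi ∧ ansB_search ds M lo hi ≤ hi ∧
        ansB_val ds (ansB_search ds M lo hi) ≤ M ∧
        (∀ t : Int, ansB_search ds M lo hi < t → t ≤ 9999 → M < ansB_val ds t) := by
    intro fuel
    induction fuel using Nat.strong_induction_on with
    | _ fuel ih =>
      intro lo hi hfuel hlo0 hlohi hvlo htail
      rw [ansB_search]
      by_cases hlt : lo < hi
      · simp only [dif_pos hlt]
        have hm : PySem.Int.floordiv (lo + hi + 1) 2 = (lo + hi + 1) / 2 :=
          PySem.Int.floordiv_eq_ediv_of_pos (by omega)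
        simp only [hm]
        have hb1 : lo + 1 ≤ (lo + hi + 1) / 2 := by omega
        have hb2 : (lo + hi + 1) / 2 ≤ hi := by omega
        by_cases hv : ansB_val ds ((lo + hi + 1) / 2) ≤ M
        · simp only [if_pos hv]
          have := ih (hi - (lo + hi + 1) / 2).toNat (by omega) ((lo + hi + 1) / 2) hi rfl
            (by omega) (by omega) hv htail
          exact ⟨by omega, this.2.1, this.2.2.1, this.2.2.2⟩
        · simp only [if_neg hv]
          have htail' : ∀ t : Int, (lo + hi + 1) / 2 - 1 < t → t ≤ 9999 → M < ansB_val ds t := by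
            intro t ht h9
            have := hmono ((lo + hi + 1) / 2) t (by omega) (by omega)
            omega
          have := ih ((lo + hi + 1) / 2 - 1 - lo).toNat (by omega) lo ((lo + hi + 1) / 2 - 1) rfl
            hlo0 (by omega) hvlo htail'
          exact ⟨this.1, by omega, this.2.2.1, this.2.2.2⟩
      · simp only [dif_neg hlt]
        have : lo = hi := by omega
        exact ⟨le_rfl, hlohi, hvlo, by rw [this]; exact htail⟩
  intro lo hi
  exact main (hi - lo).toNat lo hi rfl

lemma pvA_len (ds : List Int) (M lo0 : Int)
    (hne : ds ≠ []) (hd : ∀ d ∈ ds, 0 ≤ d) (hlo : 1 ≤ lo0)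
    (hinj : ∀ t1 t2 : Int, lo0 ≤ t1 → t1 < t2 → t2 < 10000 → ansB_val ds t1 < ansB_val ds t2)
    (hpos : ∀ t : Int, lo0 ≤ t → t < 10000 → 1 ≤ ansB_val ds t) :
    ((PySem.List.pyRange lo0 10000 1).foldl
        (fun r t =>
          match ansA_ok ds.reverse M t with
          | none => r
          | some v => if v ≠ 0 then PySem.Set.add r v else r)
        PySem.Set.empty).length =
      ((PySem.List.pyRange lo0 10000 1).filter (fun t => decide (ansB_val ds t ≤ M))).length := by
  have hbody : (PySem.List.pyRange lo0 10000 1).foldl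
      (fun r t =>
        match ansA_ok ds.reverse M t with
        | none => r
        | some v => if v ≠ 0 then PySem.Set.add r v else r)
      PySem.Set.empty
      = (PySem.List.pyRange lo0 10000 1).foldl
      (fun r t => if decide (ansB_val ds t ≤ M) then PySem.Set.add r (ansB_val ds t) else r)
      PySem.Set.empty := by
    apply PySem.List.foldl_congr_mem
    intro r t ht
    rcases PySem.List.mem_pyRange_one.1 ht with ⟨hta, htb⟩
    rw [pvOk_eq ds M t hne hd (by omega)]
    by_cases hv : ansB_val ds t ≤ M
    · have hp : 1 ≤ ansB_val ds t := hpos t hta htb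
      have hnz : ansB_val ds t ≠ 0 := by omega
      rw [if_pos hv]
      simp [hv, hnz]
    · simp [hv]
  rw [hbody,
    PySem.List.foldl_if_eq_foldl_filter (fun t => decide (ansB_val ds t ≤ M))
      (fun r t => PySem.Set.add r (ansB_val ds t)) _ PySem.Set.empty,
    ← List.foldl_map (f := ansB_val ds) (g := PySem.Set.add)]
  have hpair : ((PySem.List.pyRange lo0 10000 1).filter
      (fun t => decide (ansB_val ds t ≤ M))).Pairwise (· < ·) :=
    (PySem.List.pairwise_lt_pyRange_one lo0 10000).sublist List.filter_sublist
  have hmemF : ∀ t ∈ (PySem.List.pyRange lo0 10000 1).filter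
      (fun t => decide (ansB_val ds t ≤ M)), lo0 ≤ t ∧ t < 10000 :=
    fun t ht => PySem.List.mem_pyRange_one.1 (List.mem_of_mem_filter ht)
  have hmap : (((PySem.List.pyRange lo0 10000 1).filter
      (fun t => decide (ansB_val ds t ≤ M))).map (ansB_val ds)).Pairwise (· < ·) := by
    rw [List.pairwise_map]
    refine List.Pairwise.imp_of_mem ?_ hpair
    intro a b ha hb hab
    exact hinj a b (hmemF a ha).1 hab (hmemF b hb).2
  have hnd : (((PySem.List.pyRange lo0 10000 1).filter
      (fun t => decide (ansB_val ds t ≤ M))).map (ansB_val ds)).Nodup :=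
    hmap.imp ne_of_lt
  rw [pvFoldAdd_nodup _ PySem.Set.empty hnd (by intro x _ hx; simp [PySem.Set.empty] at hx)]
  simp [PySem.Set.empty]

-- ===== VERDICT (by name: the statement is the Claim_ definition above) =====
theorem ans_slow_spec : Claim_equal_ans_slow := by
  unfold Claim_equal_ans_slow
  intro X M _ hpre
  unfold Spec_ans_slow
  unfold Pre_ans_slow at hpre
  by_cases h1 : X = 1
  · simp [ans_slow, ans_slow_alt, h1]
  · simp only [ans_slow, ans_slow_alt, if_neg h1]
    have hXn : X = (X.toNat : Int) := by omega
    have hds : pvDecDigits X = pvDigitsN X.toNat := pvDecDigits_eq X hpre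
    by_cases h10 : X < 10
    -- single-digit case: S = [X]
    · rw [if_pos h10]
      have hds1 : pvDecDigits X = [X] := by
        rw [hds, pvDigitsN_lt X.toNat (by omega)]
        exact congrArg (fun z => [z]) hXn.symm
      rw [hds1]
      have hrev : ([X] : List Int).reverse = [X] := rfl
      rw [hrev]
      have hmax : (PySem.List.max? [X] (fun d => d)).getD 0 = X := by
        simp [PySem.List.max?]
      rw [hmax]
      have hLne : PySem.List.pyRange (X + 1) 10000 1 ≠ [] := by
        apply List.ne_nil_of_length_pos
        rw [PySem.List.length_pyRange_one]
        omega
      have hbody : ∀ (r : PySem.Set Int), ∀ t ∈ PySem.List.pyRange (X + 1) 10000 1,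
          (match ansA_ok [X] M t with
           | none => r
           | some v => if v ≠ 0 then PySem.Set.add r v else r)
          = if 1 ≤ X ∧ X ≤ M then PySem.Set.add r X else r := by
        intro r t ht
        rcases PySem.List.mem_pyRange_one.1 ht with ⟨hta, _⟩
        have hok : ansA_ok ([X] : List Int).reverse M t
            = (if ansB_val [X] t ≤ M then some (ansB_val [X] t) else none) :=
          pvOk_eq [X] M t (by simp) (by intro d hd; rw [List.mem_singleton] at hd; omega) (by omega)
        rw [hrev] at hok
        have hval : ansB_val [X] t = X := by simp [ansB_val]
        rw [hok, hval]
        by_cases hXM : X ≤ M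
        · rw [if_pos hXM]
          by_cases hX0 : X = 0
          · simp [hX0]
          · simp [hX0, (by omega : 1 ≤ X ∧ X ≤ M)]
        · rw [if_neg hXM]
          have hcf : ¬ (1 ≤ X ∧ X ≤ M) := by omega
          rw [if_neg hcf]
      rw [PySem.List.foldl_congr_mem _ _ _ _ (by intro r t ht; exact hbody r t ht)]
      by_cases hc : 1 ≤ X ∧ X ≤ M
      · simp only [if_pos hc]
        rw [pvFoldAdd_const X _ hLne]
        simp [PySem.List.len]
      · simp only [if_neg hc]
        rw [PySem.List.foldl_ignore]
        simp [PySem.List.len, PySem.Set.empty]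
    -- multi-digit case
    · rw [if_neg h10]
      have hn10 : 10 ≤ X.toNat := by omega
      obtain ⟨d, tl, hcons, hd1⟩ := pvDigitsN_head_pos X.toNat (by omega)
      have htlne : tl ≠ [] := by
        have := pvDigitsN_len2 X.toNat hn10
        rw [hcons] at this
        intro h; subst h; simp at this
      have hbounds := pvDigitsN_bounds X.toNat
      rw [hcons] at hbounds
      have hdnn : ∀ e ∈ (d :: tl), 0 ≤ e := fun e he => (hbounds e he).1
      rw [hds, hcons, pvMax_reverse (d :: tl) (by simp)]
      -- the max digit
      cases hm : PySem.List.max? (d :: tl) (fun e => e) with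
      | none => exact absurd ((PySem.List.max?_eq_none_iff _ _).1 hm) (by simp)
      | some m =>
        have hmmem : m ∈ (d :: tl) := PySem.List.max?_mem hm
        have hmax : ∀ y ∈ (d :: tl), y ≤ m := PySem.List.max?_isMax hm
        have hm1 : 1 ≤ m := le_trans hd1 (hmax d List.mem_cons_self)
        have hm9 : m ≤ 9 := (hbounds m hmmem).2
        simp only [Option.getD_some]
        have hinj : ∀ t1 t2 : Int, m + 1 ≤ t1 → t1 < t2 → t2 < 10000 →
            ansB_val (d :: tl) t1 < ansB_val (d :: tl) t2 := by
          intro t1 t2 ha hb _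
          exact pvVal_strict d tl hd1 (fun e he => hdnn e (List.mem_cons_of_mem _ he)) htlne
            t1 t2 (by omega) hb
        have hposv : ∀ t : Int, m + 1 ≤ t → t < 10000 → 1 ≤ ansB_val (d :: tl) t := by
          intro t ha _
          exact pvVal_pos d tl hd1 (fun e he => hdnn e (List.mem_cons_of_mem _ he)) t (by omega)
        have hmono : ∀ t1 t2 : Int, m + 1 ≤ t1 → t1 ≤ t2 → ansB_val (d :: tl) t1 ≤ ansB_val (d :: tl) t2 := by
          intro t1 t2 ha hb
          exact pvVal_mono (d :: tl) hdnn t1 t2 (by omega) hb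
        rw [PySem.List.len, pvA_len (d :: tl) M (m + 1) (by simp) hdnn (by omega) hinj hposv]
        by_cases hlo : M < ansB_val (d :: tl) (m + 1)
        · rw [if_pos hlo]
          have hflt : ((PySem.List.pyRange (m + 1) 10000 1).filter
              (fun t => decide (ansB_val (d :: tl) t ≤ M))).length = ((m + 1) - (m + 1)).toNat := by
            apply pvFilterRange_len (m + 1) 10000 (m + 1) le_rfl (by omega)
            intro t hta htb
            constructor
            · intro hp
              by_contra hge
              have := hmono (m + 1) t (by omega) (by omega)
              simp at hp
              omega
            · omega
          rw [hflt]
          simp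
        · rw [if_neg hlo]
          obtain ⟨hk1, hk2, hk3, hk4⟩ := pvSearch_spec (d :: tl) M (m + 1) hmono (m + 1) 9999
            le_rfl (by omega) (by omega) (by intro t ht h9; omega)
          set k := ansB_search (d :: tl) M (m + 1) 9999 with hk
          have hflt : ((PySem.List.pyRange (m + 1) 10000 1).filter
              (fun t => decide (ansB_val (d :: tl) t ≤ M))).length = (k + 1 - (m + 1)).toNat := by
            apply pvFilterRange_len (m + 1) 10000 (k + 1) (by omega) (by omega)
            intro t hta htb
            constructor
            · intro hp
              by_contra hge
              have := hk4 t (by omega) (by omega)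
              simp at hp
              omega
            · intro htk
              simp only [decide_eq_true_eq]
              calc ansB_val (d :: tl) t ≤ ansB_val (d :: tl) k := hmono t k hta (by omega)
                _ ≤ M := hk3
          rw [hflt]
          omega
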